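-- pv_equiv track=rewrite | github.com/jimin-fundamental/baekjoonAlgorithm | 백준/Silver/19941. 햄버거 분배/햄버거 분배.py | solution
-- ===== SOURCE A (Python) =====
-- def solution(n,k,string):
--     eat = 0
--     #사람이 앉아있는 곳
--     people = []
--     burger = []
--     for i in range(len(string)):
--         if string[i] == 'P':
--             people.append(i)
--         else:
--             burger.append(i)
--
--     burger_set = set(burger)  # 빠른 탐색을 위해 버거 위치를 set으로 저장
--
--     for loc in people:
--         didEat = False
--         # 왼쪽
--         for a in range(k,0, -1):
--             check = loc - a #
--             if check in burger_set:
--                 eat += 1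
--                 didEat = True
--                 # burger list에서 check 숫자를 없애야 됨
--                 burger_set.remove(check)
--                 break
--         # 오른쪽은 제일 가까운 것부터 먹어야 되는듯
--         if didEat ==False:
--             for a in range(1,k+1):
--                 check = loc + a
--                 if check in burger_set:
--                     eat += 1
--                     # burger list에서 check 숫자를 없애야 됨 - burger.remove(check)를 사용하면 특정 값을 찾아 삭제
--                     burger_set.remove(check)
--                     break
--
--     answer = eat
--     return answer
-- ===== SOURCE B (Python) =====
-- def solution(n, k, string):
--     # Two-pointer sweep: burgers and people are both met in increasing position
--     # order, so a single monotone pointer over the burger positions replaces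
--     # A's per-person k-wide membership scans.
--     burgers = [i for i, c in enumerate(string) if c != 'P']
--     eat = 0
--     j = 0
--     for i, c in enumerate(string):
--         if c == 'P':
--             while j < len(burgers) and burgers[j] < i - k:
--                 j += 1
--             if j < len(burgers) and burgers[j] <= i + k:
--                 eat += 1
--                 j += 1
--     return eat
-- ===== Notes on version B (the rewrite author's own statement) =====
-- stated objective: faster
-- what changed: Replaces A's per-person k-wide membership scans over a shrinking burger set by a single monotone two-pointer sweep over the sorted burger positions, so each burger position is visited at most once overall.
import Mathlib
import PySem

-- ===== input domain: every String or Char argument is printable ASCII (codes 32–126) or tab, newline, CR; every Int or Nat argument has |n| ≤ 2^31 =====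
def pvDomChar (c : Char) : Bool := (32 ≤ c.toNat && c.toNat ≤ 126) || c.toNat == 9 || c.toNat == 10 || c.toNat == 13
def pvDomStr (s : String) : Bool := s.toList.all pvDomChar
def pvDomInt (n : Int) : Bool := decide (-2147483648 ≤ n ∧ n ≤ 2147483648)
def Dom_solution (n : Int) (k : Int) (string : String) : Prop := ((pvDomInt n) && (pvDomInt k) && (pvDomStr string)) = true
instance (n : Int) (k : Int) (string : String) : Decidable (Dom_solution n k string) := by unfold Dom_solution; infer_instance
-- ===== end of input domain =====

-- B replaces A's per-person k-wide membership scans with a single monotone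
-- two-pointer sweep over the sorted burger positions (objective: faster).

-- ===== PORT A =====
-- left scan: 'for a in range(k,0,-1): if loc-a in burger_set: … break' (Option = break-with-result)
def solAScanL (k loc : Int) (bs : PySem.Set Int) : Option Int :=
  (PySem.List.pyRange k 0 (-1)).foldl
    (fun acc a =>
      match acc with
      | some m => some m
      | none => if PySem.Set.contains bs (loc - a) then some (loc - a) else none)
    none

-- right scan: 'for a in range(1,k+1): if loc+a in burger_set: … break'
def solAScanR (k loc : Int) (bs : PySem.Set Int) : Option Int :=
  (PySem.List.pyRange 1 (k + 1) 1).foldl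
    (fun acc a =>
      match acc with
      | some m => some m
      | none => if PySem.Set.contains bs (loc + a) then some (loc + a) else none)
    none

-- body of 'for loc in people' (eat += 1 and burger_set.remove(check) on a hit)
def solAStep (k : Int) (st : Int × PySem.Set Int) (loc : Int) : Int × PySem.Set Int :=
  match solAScanL k loc st.2 with
  | some m => (st.1 + 1, (PySem.Set.remove? st.2 m).getD st.2)
  | none =>
    match solAScanR k loc st.2 with
    | some m => (st.1 + 1, (PySem.Set.remove? st.2 m).getD st.2)
    | none => st

def solution (n : Int) (k : Int) (string : String) : Int :=
  let pb := (PySem.List.enumerate string.toList).foldl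
      (fun (pb : List Int × List Int) ic =>
        if ic.2 = 'P' then (pb.1 ++ [ic.1], pb.2) else (pb.1, pb.2 ++ [ic.1]))
      ([], [])
  (pb.1.foldl (solAStep k) (0, PySem.Set.ofList pb.2)).1

-- ===== PORT B =====
-- 'while j < len(burgers) and burgers[j] < bound: j += 1'
def solBSkip (burgers : List Int) (bound : Int) (j : Nat) : Nat :=
  if h : j < burgers.length then
    if burgers[j] < bound then solBSkip burgers bound (j + 1) else j
  else j
termination_by burgers.length - j

-- body of the 'if c == 'P'' branch of B's loop
def solBStep (burgers : List Int) (k : Int) (st : Int × Nat) (i : Int) : Int × Nat :=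
  let j := solBSkip burgers (i - k) st.2
  if h : j < burgers.length then
    if burgers[j] ≤ i + k then (st.1 + 1, j + 1) else (st.1, j)
  else (st.1, j)

def solution_alt (n : Int) (k : Int) (string : String) : Int :=
  let burgers := (PySem.List.enumerate string.toList).filterMap
      (fun ic => if ic.2 ≠ 'P' then some ic.1 else none)
  ((PySem.List.enumerate string.toList).foldl
    (fun st ic => if ic.2 = 'P' then solBStep burgers k st ic.1 else st)
    ((0 : Int), (0 : Nat))).1

-- ===== PRECONDITION & SPEC =====
def Spec_solution (n : Int) (k : Int) (string : String) (out : Int) : Prop := out = solution_alt n k string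
instance (n : Int) (k : Int) (string : String) (out : Int) : Decidable (Spec_solution n k string out) := by unfold Spec_solution; infer_instance

-- ===== CLAIM (what is proved, stated in full; the proofs are below) =====
def Claim_equal_solution : Prop := ∀ (n : Int) (k : Int) (string : String), Dom_solution n k string → Spec_solution n k string (solution n k string)

-- ===== LEMMAS AND PROOFS =====

-- result r is Python's "first hit": the smallest element of S in [lo, hi] (none if S misses the window)
def IsFirstHit (S : List Int) (lo hi : Int) (r : Option Int) : Prop :=
  match r with
  | some m => m ∈ S ∧ lo ≤ m ∧ m ≤ hi ∧ ∀ x ∈ S, lo ≤ x → x < m → False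
  | none => ∀ x ∈ S, ¬(lo ≤ x ∧ x ≤ hi)

def firstHit (S : List Int) (cands : List Int) : Option Int :=
  cands.foldl
    (fun acc x =>
      match acc with
      | some m => some m
      | none => if PySem.Set.contains S x then some x else none)
    none

lemma firstHit_some (S : List Int) (cands : List Int) (m : Int) :
    cands.foldl
      (fun acc x =>
        match acc with
        | some m => some m
        | none => if PySem.Set.contains S x then some x else none)
      (some m) = some m := by
  induction cands with
  | nil => rfl
  | cons c cs ih => simpa using ih

lemma firstHit_uniq (S : List Int) (lo hi : Int) (r1 r2 : Option Int)
    (h1 : IsFirstHit S lo hi r1) (h2 : IsFirstHit S lo hi r2) : r1 = r2 := by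
  cases r1 with
  | none =>
    cases r2 with
    | none => rfl
    | some m2 =>
      obtain ⟨hm, hlo, hhi, _⟩ := h2
      exact absurd ⟨hlo, hhi⟩ (h1 m2 hm)
  | some m1 =>
    obtain ⟨hm1, hlo1, hhi1, hmin1⟩ := h1
    cases r2 with
    | none => exact absurd ⟨hlo1, hhi1⟩ (h2 m1 hm1)
    | some m2 =>
      obtain ⟨hm2, hlo2, hhi2, hmin2⟩ := h2
      have : m1 = m2 := by
        rcases lt_trichotomy m1 m2 with h | h | h
        · exact absurd h (fun h => hmin2 m1 hm1 hlo1 h)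
        · exact h
        · exact absurd h (fun h => hmin1 m2 hm2 hlo2 h)
      simp [this]

lemma firstHit_pyRange_spec (S : List Int) (lo hi : Int) :
    IsFirstHit S lo (hi - 1) (firstHit S (PySem.List.pyRange lo hi 1)) := by
  by_cases hle : hi ≤ lo
  · rw [PySem.List.pyRange_one_eq_nil hle]
    intro x hx ⟨h1, h2⟩
    omega
  · rw [PySem.List.pyRange_one_cons (by omega)]
    unfold firstHit
    simp only [List.foldl_cons]
    by_cases hmem : lo ∈ S
    · have hc : PySem.Set.contains S lo = true := by
        simp [PySem.Set.contains, hmem]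
      simp only [hc, if_true]
      rw [firstHit_some]
      exact ⟨hmem, le_refl lo, by omega, fun x hx h1 h2 => by omega⟩
    · have hc : PySem.Set.contains S lo = false := by
        simp [PySem.Set.contains, hmem]
      simp only [hc, Bool.false_eq_true, if_false]
      have ih := firstHit_pyRange_spec S (lo + 1) hi
      unfold firstHit at ih
      cases hr : (PySem.List.pyRange (lo + 1) hi 1).foldl
          (fun acc x =>
            match acc with
            | some m => some m
            | none => if PySem.Set.contains S x then some x else none)
          none with
      | some m =>
        rw [hr] at ih
        obtain ⟨hm, hlo, hhi, hmin⟩ := ih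
        refine ⟨hm, by omega, hhi, fun x hx h1 h2 => ?_⟩
        by_cases hxlo : x = lo
        · exact hmem (hxlo ▸ hx)
        · exact hmin x hx (by omega) h2
      | none =>
        rw [hr] at ih
        intro x hx ⟨h1, h2⟩
        by_cases hxlo : x = lo
        · exact hmem (hxlo ▸ hx)
        · exact ih x hx ⟨by omega, h2⟩
termination_by (hi - lo).toNat
decreasing_by omega

lemma candsL_eq (k loc : Int) :
    (PySem.List.pyRange k 0 (-1)).map (fun a => loc - a) = PySem.List.pyRange (loc - k) loc 1 := by
  rw [PySem.List.pyRange_neg_one, PySem.List.pyRange_one, List.map_map]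
  rw [show (k - 0).toNat = (loc - (loc - k)).toNat by omega]
  apply List.map_congr_left
  intro t _
  simp only [Function.comp_apply]
  omega

lemma candsR_eq (k loc : Int) :
    (PySem.List.pyRange 1 (k + 1) 1).map (fun a => loc + a) = PySem.List.pyRange (loc + 1) (loc + k + 1) 1 := by
  rw [PySem.List.pyRange_one, PySem.List.pyRange_one, List.map_map]
  rw [show (k + 1 - 1).toNat = (loc + k + 1 - (loc + 1)).toNat by omega]
  apply List.map_congr_left
  intro t _
  simp only [Function.comp_apply]
  omega

lemma scanL_eq (k loc : Int) (bs : PySem.Set Int) :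
    solAScanL k loc bs = firstHit bs (PySem.List.pyRange (loc - k) loc 1) := by
  rw [← candsL_eq k loc]
  unfold solAScanL firstHit
  rw [List.foldl_map]

lemma scanR_eq (k loc : Int) (bs : PySem.Set Int) :
    solAScanR k loc bs = firstHit bs (PySem.List.pyRange (loc + 1) (loc + k + 1) 1) := by
  rw [← candsR_eq k loc]
  unfold solAScanR firstHit
  rw [List.foldl_map]

-- A's combined (left-then-right) scan, as it appears in solAStep
def aHit (k loc : Int) (bs : PySem.Set Int) : Option Int :=
  match solAScanL k loc bs with
  | some m => some m
  | none => solAScanR k loc bs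

lemma aHit_spec (k loc : Int) (bs : PySem.Set Int) (hloc : loc ∉ bs) :
    IsFirstHit bs (loc - k) (loc + k) (aHit k loc bs) := by
  unfold aHit
  rw [scanL_eq, scanR_eq]
  have hL := firstHit_pyRange_spec bs (loc - k) loc
  have hR := firstHit_pyRange_spec bs (loc + 1) (loc + k + 1)
  cases hFL : firstHit bs (PySem.List.pyRange (loc - k) loc 1) with
  | some m =>
    rw [hFL] at hL
    obtain ⟨hm, hlo, hhi, hmin⟩ := hL
    exact ⟨hm, hlo, by omega, hmin⟩
  | none =>
    rw [hFL] at hL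
    cases hFR : firstHit bs (PySem.List.pyRange (loc + 1) (loc + k + 1) 1) with
    | some m =>
      rw [hFR] at hR
      obtain ⟨hm, hlo, hhi, hmin⟩ := hR
      refine ⟨hm, by omega, by omega, fun x hx h1 h2 => ?_⟩
      rcases lt_trichotomy x loc with h | h | h
      · exact hL x hx ⟨h1, by omega⟩
      · exact hloc (h ▸ hx)
      · exact hmin x hx (by omega) h2
    | none =>
      rw [hFR] at hR
      intro x hx ⟨h1, h2⟩
      rcases lt_trichotomy x loc with h | h | h
      · exact hL x hx ⟨h1, by omega⟩
      · exact hloc (h ▸ hx)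
      · exact hR x hx ⟨by omega, by omega⟩

lemma solBSkip_spec (burgers : List Int) (bound : Int) (j : Nat) (hj : j ≤ burgers.length) :
    j ≤ solBSkip burgers bound j ∧ solBSkip burgers bound j ≤ burgers.length ∧
    (∀ t (ht : t < burgers.length), j ≤ t → t < solBSkip burgers bound j → burgers[t] < bound) ∧
    (∀ h : solBSkip burgers bound j < burgers.length, bound ≤ burgers[solBSkip burgers bound j]) := by
  unfold solBSkip
  by_cases h : j < burgers.length
  · by_cases hlt : burgers[j] < bound
    · simp only [dif_pos h, if_pos hlt]
      obtain ⟨ih1, ih2, ih3, ih4⟩ := solBSkip_spec burgers bound (j + 1) (by omega)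
      refine ⟨by omega, ih2, fun t ht h1 h2 => ?_, ih4⟩
      by_cases htj : t = j
      · subst htj; exact hlt
      · exact ih3 t ht (by omega) h2
    · simp only [dif_pos h, if_neg hlt]
      exact ⟨le_refl j, by omega, fun t ht h1 h2 => by omega, fun _ => by omega⟩
  · simp only [dif_neg h]
    exact ⟨le_refl j, hj, fun t ht h1 h2 => by omega, fun hlt => absurd hlt h⟩
termination_by burgers.length - j
decreasing_by omega

-- membership in a drop, in index form
lemma mem_drop_iff (l : List Int) (j : Nat) (x : Int) :
    x ∈ l.drop j ↔ ∃ t, ∃ ht : t < l.length, j ≤ t ∧ x = l[t] := by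
  constructor
  · intro hx
    obtain ⟨t, ht, hxe⟩ := List.mem_iff_getElem.mp hx
    have hlen : t < l.length - j := by simpa using ht
    refine ⟨j + t, by omega, by omega, ?_⟩
    rw [← List.getElem_drop]
    · exact hxe.symm
  · rintro ⟨t, ht, hjt, rfl⟩
    rw [show l[t] = (l.drop j)[t - j]'(by simp; omega) from ?_]
    · exact List.getElem_mem _
    · rw [List.getElem_drop]
      congr 1
      omega

-- B's per-person outcome, as an Option
def bHit (burgers : List Int) (k : Int) (j : Nat) (i : Int) : Option Int :=
  let j' := solBSkip burgers (i - k) j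
  if h : j' < burgers.length then
    if burgers[j'] ≤ i + k then some burgers[j'] else none
  else none

lemma bHit_spec (burgers : List Int) (k : Int) (j : Nat) (i : Int) (D : List Int)
    (hb : burgers.Pairwise (· < ·)) (hj : j ≤ burgers.length)
    (hD : ∀ x ∈ D, x < i - k) :
    IsFirstHit (D ++ burgers.drop j) (i - k) (i + k) (bHit burgers k j i) := by
  obtain ⟨hs1, hs2, hs3, hs4⟩ := solBSkip_spec burgers (i - k) j hj
  have hmono := List.pairwise_iff_getElem.mp hb
  unfold bHit
  set j' := solBSkip burgers (i - k) j with hj'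
  by_cases h : j' < burgers.length
  · by_cases hhi : burgers[j'] ≤ i + k
    · simp only [dif_pos h, if_pos hhi]
      refine ⟨?_, hs4 h, hhi, ?_⟩
      · apply List.mem_append_right
        exact (mem_drop_iff _ _ _).mpr ⟨j', h, hs1, rfl⟩
      · intro x hx h1 h2
        rcases List.mem_append.mp hx with hxD | hxd
        · exact absurd h1 (by have := hD x hxD; omega)
        · obtain ⟨t, ht, hjt, rfl⟩ := (mem_drop_iff _ _ _).mp hxd
          by_cases htj : t < j'
          · have := hs3 t ht hjt htj
            omega
          · rcases Nat.lt_or_ge j' t with hlt | hge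
            · have := hmono j' t h ht hlt
              omega
            · have : t = j' := by omega
              subst this
              omega
    · simp only [dif_pos h, if_neg hhi]
      intro x hx ⟨h1, h2⟩
      rcases List.mem_append.mp hx with hxD | hxd
      · have := hD x hxD; omega
      · obtain ⟨t, ht, hjt, rfl⟩ := (mem_drop_iff _ _ _).mp hxd
        by_cases htj : t < j'
        · have := hs3 t ht hjt htj
          omega
        · rcases Nat.lt_or_ge j' t with hlt | hge
          · have := hmono j' t h ht hlt
            omega
          · have : t = j' := by omega
            subst this
            omega
  · simp only [dif_neg h]
    intro x hx ⟨h1, h2⟩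
    rcases List.mem_append.mp hx with hxD | hxd
    · have := hD x hxD; omega
    · obtain ⟨t, ht, hjt, rfl⟩ := (mem_drop_iff _ _ _).mp hxd
      have : t < j' := by omega
      have := hs3 t ht hjt this
      omega

-- removing the hit element from A's set
lemma remove_hit (D seg rest : List Int) (m : Int)
    (hmD : m ∉ D) (hmS : m ∉ seg) (hmR : m ∉ rest) :
    (PySem.Set.remove? (D ++ seg ++ m :: rest) m).getD (D ++ seg ++ m :: rest)
      = D ++ seg ++ rest := by
  have hc : PySem.Set.contains (D ++ seg ++ m :: rest) m = true := by
    simp [PySem.Set.contains, List.contains_iff_mem]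
  have hfD : D.filter (fun y => !y == m) = D :=
    List.filter_eq_self.mpr (fun x hx => by simp; exact fun h => hmD (h ▸ hx))
  have hfS : seg.filter (fun y => !y == m) = seg :=
    List.filter_eq_self.mpr (fun x hx => by simp; exact fun h => hmS (h ▸ hx))
  have hfR : rest.filter (fun y => !y == m) = rest :=
    List.filter_eq_self.mpr (fun x hx => by simp; exact fun h => hmR (h ▸ hx))
  simp only [PySem.Set.remove?, hc, if_true, Option.getD_some, PySem.Set.discard,
    List.filter_append, List.filter_cons, hfD, hfS, hfR]
  simp

-- an element of the skipped segment, in index form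
lemma mem_take_drop (l : List Int) (j j' : Nat) (x : Int)
    (h : x ∈ (l.drop j).take (j' - j)) :
    ∃ t, ∃ ht : t < l.length, j ≤ t ∧ t < j' ∧ x = l[t] := by
  obtain ⟨u, hu, hxe⟩ := List.mem_iff_getElem.mp h
  have hu' := hu
  simp only [List.length_take, List.length_drop] at hu'
  have hu1 : u < j' - j := by omega
  have hu2 : j + u < l.length := by omega
  refine ⟨j + u, hu2, by omega, by omega, ?_⟩
  rw [← hxe, List.getElem_take, List.getElem_drop]

-- the core simulation: A's fold over people with (eat, dead ++ drop j) matches B's fold with (eat, j)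
lemma core (k : Int) (burgers : List Int) (hb : burgers.Pairwise (· < ·)) :
    ∀ (people : List Int), people.Pairwise (· < ·) →
    ∀ (D : List Int) (j : Nat) (eat : Int),
    j ≤ burgers.length →
    (∀ x ∈ D, ∀ p ∈ people, x < p - k) →
    (∀ p ∈ people, p ∉ burgers) →
    (∀ x ∈ D, x ∈ burgers) →
    (people.foldl (solAStep k) (eat, D ++ burgers.drop j)).1
      = (people.foldl (solBStep burgers k) (eat, j)).1 := by
  intro people
  induction people with
  | nil => intros; rfl
  | cons p ps ih =>
    intro hpw D j eat hj hD hpnb hDb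
    obtain ⟨hpq, hpsw⟩ := List.pairwise_cons.mp hpw
    obtain ⟨hs1, hs2, hs3, hs4⟩ := solBSkip_spec burgers (p - k) j hj
    have hmono := List.pairwise_iff_getElem.mp hb
    set j' := solBSkip burgers (p - k) j with hj'def
    set seg := (burgers.drop j).take (j' - j) with hsegdef
    have hdropsplit : burgers.drop j = seg ++ burgers.drop j' := by
      have hdd : (burgers.drop j).drop (j' - j) = burgers.drop j' := by
        rw [List.drop_drop]
        congr 1
        omega
      rw [hsegdef]
      conv_lhs => rw [← List.take_append_drop (j' - j) (burgers.drop j)]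
      rw [hdd]
    have hseg : ∀ x ∈ seg, ∃ t, ∃ ht : t < burgers.length, j ≤ t ∧ t < j' ∧ x = burgers[t] :=
      fun x hx => mem_take_drop burgers j j' x hx
    have hseglt : ∀ x ∈ seg, x < p - k := by
      intro x hx
      obtain ⟨t, ht, h1, h2, rfl⟩ := hseg x hx
      exact hs3 t ht h1 h2
    have hDp : ∀ x ∈ D, x < p - k := fun x hx => hD x hx p (by simp)
    have hsubseg : ∀ x ∈ seg, x ∈ burgers := by
      intro x hx
      obtain ⟨t, ht, _, _, rfl⟩ := hseg x hx
      exact List.getElem_mem _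
    have hpnotS : p ∉ D ++ burgers.drop j := by
      intro hp
      rcases List.mem_append.mp hp with h | h
      · exact hpnb p (by simp) (hDb p h)
      · exact hpnb p (by simp) (List.drop_subset _ _ h)
    have hEq : aHit k p (D ++ burgers.drop j) = bHit burgers k j p :=
      firstHit_uniq _ _ _ _ _ (aHit_spec k p _ hpnotS) (bHit_spec burgers k j p D hb hj hDp)
    have hDnew : ∀ x ∈ D ++ seg, ∀ q ∈ ps, x < q - k := by
      intro x hx q hq
      rcases List.mem_append.mp hx with h | h
      · exact hD x h q (by simp [hq])
      · have h1 := hseglt x h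
        have h2 := hpq q hq
        omega
    have hDbnew : ∀ x ∈ D ++ seg, x ∈ burgers := by
      intro x hx
      rcases List.mem_append.mp hx with h | h
      · exact hDb x h
      · exact hsubseg x h
    have hpsnb : ∀ q ∈ ps, q ∉ burgers := fun q hq => hpnb q (by simp [hq])
    simp only [List.foldl_cons]
    cases hBv : bHit burgers k j p with
    | none =>
      have hAv : aHit k p (D ++ burgers.drop j) = none := by rw [hEq, hBv]
      have hAstep : solAStep k (eat, D ++ burgers.drop j) p = (eat, D ++ burgers.drop j) := by
        unfold aHit at hAv
        unfold solAStep
        cases h1 : solAScanL k p (D ++ burgers.drop j) with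
        | some m => rw [h1] at hAv; simp at hAv
        | none => rw [h1] at hAv; simp only at hAv ⊢; rw [hAv]
      have hBstep : solBStep burgers k (eat, j) p = (eat, j') := by
        unfold bHit at hBv
        unfold solBStep
        simp only [← hj'def] at hBv ⊢
        by_cases h : j' < burgers.length
        · rw [dif_pos h] at hBv ⊢
          by_cases h2 : burgers[j'] ≤ p + k
          · rw [if_pos h2] at hBv; cases hBv
          · rw [if_neg h2]
        · rw [dif_neg h] at hBv ⊢
      rw [hAstep, hBstep]
      have hset : D ++ burgers.drop j = (D ++ seg) ++ burgers.drop j' := by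
        rw [hdropsplit, List.append_assoc]
      rw [hset]
      exact ih hpsw (D ++ seg) j' eat hs2 hDnew hpsnb hDbnew
    | some m =>
      have hAv : aHit k p (D ++ burgers.drop j) = some m := by rw [hEq, hBv]
      have hBv' := hBv
      unfold bHit at hBv'
      simp only [← hj'def] at hBv'
      by_cases h : j' < burgers.length
      swap
      · rw [dif_neg h] at hBv'; cases hBv'
      rw [dif_pos h] at hBv'
      by_cases h2 : burgers[j'] ≤ p + k
      swap
      · rw [if_neg h2] at hBv'; cases hBv'
      rw [if_pos h2] at hBv'
      have hm : m = burgers[j'] := by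
        injection hBv' with hm'
        exact hm'.symm
      subst hm
      have hmlo : p - k ≤ burgers[j'] := hs4 h
      have hmD : burgers[j'] ∉ D := by
        intro hx
        have := hDp _ hx
        omega
      have hmS : burgers[j'] ∉ seg := by
        intro hx
        have := hseglt _ hx
        omega
      have hmR : burgers[j'] ∉ burgers.drop (j' + 1) := by
        intro hx
        obtain ⟨t, ht, h1, he⟩ := (mem_drop_iff _ _ _).mp hx
        have := hmono j' t h ht (by omega)
        omega
      have hset : D ++ burgers.drop j = D ++ seg ++ burgers[j'] :: burgers.drop (j' + 1) := by
        rw [hdropsplit, List.drop_eq_getElem_cons h, ← List.append_assoc]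
      have hAstep : solAStep k (eat, D ++ burgers.drop j) p
          = (eat + 1, (PySem.Set.remove? (D ++ burgers.drop j) burgers[j']).getD
              (D ++ burgers.drop j)) := by
        unfold aHit at hAv
        unfold solAStep
        cases h1 : solAScanL k p (D ++ burgers.drop j) with
        | some m1 =>
          rw [h1] at hAv
          simp only [Option.some.injEq] at hAv
          simp [hAv]
        | none =>
          rw [h1] at hAv
          simp only at hAv ⊢
          rw [hAv]
      have hBstep : solBStep burgers k (eat, j) p = (eat + 1, j' + 1) := by
        unfold solBStep
        simp only [← hj'def]
        rw [dif_pos h, if_pos h2]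
      rw [hAstep, hBstep]
      have hrm : (PySem.Set.remove? (D ++ burgers.drop j) burgers[j']).getD (D ++ burgers.drop j)
          = (D ++ seg) ++ burgers.drop (j' + 1) := by
        rw [hset, remove_hit _ _ _ _ hmD hmS hmR]
      rw [hrm]
      exact ih hpsw (D ++ seg) (j' + 1) (eat + 1) (by omega) hDnew hpsnb hDbnew

-- A's position-splitting pass, in closed form
lemma buildA (l : List (Int × Char)) (acc1 acc2 : List Int) :
    l.foldl
      (fun (pb : List Int × List Int) ic =>
        if ic.2 = 'P' then (pb.1 ++ [ic.1], pb.2) else (pb.1, pb.2 ++ [ic.1]))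
      (acc1, acc2)
    = (acc1 ++ (l.filter (fun ic => ic.2 == 'P')).map (·.1),
       acc2 ++ (l.filter (fun ic => !(ic.2 == 'P'))).map (·.1)) := by
  induction l generalizing acc1 acc2 with
  | nil => simp
  | cons x xs ih =>
    by_cases h : x.2 = 'P'
    · simp [List.foldl_cons, List.filter_cons, h, ih]
    · simp [List.foldl_cons, List.filter_cons, h, ih]

-- B's comprehension, in the same closed form
lemma buildB (l : List (Int × Char)) :
    l.filterMap (fun ic => if ic.2 ≠ 'P' then some ic.1 else none)
      = (l.filter (fun ic => !(ic.2 == 'P'))).map (·.1) := by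
  induction l with
  | nil => rfl
  | cons x xs ih =>
    rw [List.filterMap_cons, List.filter_cons]
    by_cases h : x.2 = 'P'
    · rw [show (if x.2 ≠ 'P' then some x.1 else none) = none by simp [h]]
      rw [show (!(x.2 == 'P')) = false by simp [h]]
      simpa using ih
    · rw [show (if x.2 ≠ 'P' then some x.1 else none) = some x.1 by simp [h]]
      rw [show (!(x.2 == 'P')) = true by simp [h]]
      simp only [if_true, List.map_cons]
      rw [ih]

-- a fold that acts only on 'P' entries is a fold over the person positions
lemma foldP {σ : Type} (l : List (Int × Char)) (f : σ → Int → σ) (st : σ) :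
    l.foldl (fun st ic => if ic.2 = 'P' then f st ic.1 else st) st
      = ((l.filter (fun ic => ic.2 == 'P')).map (·.1)).foldl f st := by
  induction l generalizing st with
  | nil => rfl
  | cons x xs ih =>
    by_cases h : x.2 = 'P'
    · simp [List.foldl_cons, List.filter_cons, h, ih]
    · simp [List.foldl_cons, List.filter_cons, h, ih]

-- set(xs) of a duplicate-free list is the list itself
lemma ofList_eq_self (l : List Int) (h : l.Nodup) : PySem.Set.ofList l = l := by
  have gen : ∀ (l acc : List Int), l.Nodup → (∀ x ∈ l, x ∉ acc) →
      l.foldl PySem.Set.add acc = acc ++ l := by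
    intro l
    induction l with
    | nil => intro acc _ _; simp
    | cons x xs ih =>
      intro acc hn hd
      have hc : PySem.Set.contains acc x = false := by
        simp only [PySem.Set.contains, List.contains_iff_mem, Bool.eq_false_iff, ne_eq,
          decide_eq_true_eq]
        exact hd x (by simp)
      rw [List.foldl_cons]
      rw [show PySem.Set.add acc x = acc ++ [x] by
        simp only [PySem.Set.add, hc, Bool.false_eq_true, if_false]]
      rw [ih (acc ++ [x]) (List.nodup_cons.mp hn).2 ?_]
      · simp
      · intro y hy hmem
        rcases List.mem_append.mp hmem with h1 | h1
        · exact hd y (by simp [hy]) h1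
        · simp at h1
          subst h1
          exact (List.nodup_cons.mp hn).1 hy
  have := gen l [] h (by simp)
  simpa [PySem.Set.ofList, PySem.Set.empty] using this

-- in a list with strictly increasing first components, the first component determines the entry
lemma fst_determines (l : List (Int × Char)) (hl : l.Pairwise (fun a b => a.1 < b.1))
    (x y : Int × Char) (hx : x ∈ l) (hy : y ∈ l) (hxy : x.1 = y.1) : x = y := by
  obtain ⟨i, hi, hix⟩ := List.mem_iff_getElem.mp hx
  obtain ⟨jj, hjj, hjy⟩ := List.mem_iff_getElem.mp hy
  have hm := List.pairwise_iff_getElem.mp hl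
  rcases lt_trichotomy i jj with h | h | h
  · have := hm i jj hi hjj h
    rw [hix, hjy] at this
    omega
  · subst h
    rw [← hix, ← hjy]
  · have := hm jj i hjj hi h
    rw [hix, hjy] at this
    omega

-- ===== VERDICT =====
theorem solution_spec : Claim_equal_solution := by
  intro n k string _
  unfold Spec_solution solution solution_alt
  simp only []
  rw [buildA, buildB, foldP]
  simp only [List.nil_append]
  set enum := PySem.List.enumerate string.toList with henumdef
  set people := (enum.filter (fun ic => ic.2 == 'P')).map (·.1) with hpeople
  set burgers := (enum.filter (fun ic => !(ic.2 == 'P'))).map (·.1) with hburgers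
  have henum : enum.Pairwise (fun a b => a.1 < b.1) := PySem.List.pairwise_lt_enumerate _ _
  have hb : burgers.Pairwise (· < ·) := by
    rw [hburgers]
    exact (henum.filter _).map _ (fun a b h => h)
  have hp : people.Pairwise (· < ·) := by
    rw [hpeople]
    exact (henum.filter _).map _ (fun a b h => h)
  have hdisj : ∀ q ∈ people, q ∉ burgers := by
    intro q hq hqb
    rw [hpeople] at hq
    rw [hburgers] at hqb
    obtain ⟨e1, he1, he1q⟩ := List.mem_map.mp hq
    obtain ⟨e2, he2, he2q⟩ := List.mem_map.mp hqb
    have he1' := List.mem_filter.mp he1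
    have he2' := List.mem_filter.mp he2
    have : e1 = e2 := fst_determines enum henum e1 e2 he1'.1 he2'.1 (by rw [he1q, he2q])
    rw [this] at he1'
    have h1 := he1'.2
    have h2 := he2'.2
    simp at h1 h2
    exact h2 h1
  have hnodup : burgers.Nodup := hb.imp (fun h => ne_of_lt h)
  rw [ofList_eq_self burgers hnodup]
  have := core k burgers hb people hp [] 0 0 (by omega) (by simp) hdisj (by simp)
  simpa using this
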